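-- pv_equiv track=rewrite | github.com/pugachAG/PriceFieldOCR | src/demo_recognizer.py | fix_field_str
-- ===== SOURCE A (Python) =====
-- def fix_field_str(price):
--     res, chars_cnt = '', 0
--     for ch in price[::-1]:
--         if ch in '0123456789':
--             if chars_cnt == 2:
--                 res += '.'
--             if chars_cnt > 2 and chars_cnt%3 == 2:
--                 res += ','
--             res += ch
--             chars_cnt += 1
--     return '$' + res[::-1]
-- ===== SOURCE B (Python) =====
-- def fix_field_str(price):
--     digits = ''.join(c for c in price if c in '0123456789')
--     if len(digits) <= 2:
--         return '$' + digits
--     dollars, cents = digits[:-2], digits[-2:]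
--     body = dollars[-3:]
--     i = len(dollars) - 3
--     while i > 0:
--         body = dollars[max(i - 3, 0):i] + ',' + body
--         i -= 3
--     return '$' + body + '.' + cents
-- ===== Notes on version B (the rewrite author's own statement) =====
-- stated objective: alternative
-- what changed: A scans the reversed string char by char with a counter, emitting the decimal point and the thousands separators as side effects of the count; B filters the digits once, splits off the last two as cents, and builds the dollar part by slicing three-character chunks off the right and prepending them with separators.
import Mathlib
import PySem

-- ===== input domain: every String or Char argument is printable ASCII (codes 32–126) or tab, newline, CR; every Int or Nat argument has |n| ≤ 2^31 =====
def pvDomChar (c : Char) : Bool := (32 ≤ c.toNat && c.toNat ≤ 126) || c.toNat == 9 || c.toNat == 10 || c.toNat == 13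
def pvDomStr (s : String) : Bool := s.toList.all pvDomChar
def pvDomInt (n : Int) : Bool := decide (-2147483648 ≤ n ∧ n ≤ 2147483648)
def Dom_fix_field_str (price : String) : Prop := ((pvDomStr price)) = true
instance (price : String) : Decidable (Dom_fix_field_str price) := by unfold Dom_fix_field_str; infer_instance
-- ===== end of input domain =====

-- B replaces A's reversed char-by-char counter scan by filter + split-off-cents + right-to-left
-- three-digit chunking (an alternative decomposition of the same O(n) job; not claimed faster).

-- ===== PORT A =====
-- price[::-1] is reverse (PySem.List.slice?_none_none_neg_one); 'ch in "0123456789"' for a single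
-- char is exactly membership in the ten digit chars; res is a char list appended at the end,
-- chars_cnt starts at 0 and only increments, so Nat carries Python's int exactly here.
def fix_field_str (price : String) : String :=
  let st := price.toList.reverse.foldl (fun (st : List Char × Nat) ch =>
    if "0123456789".toList.contains ch then
      let res := if st.2 == 2 then st.1 ++ ['.'] else st.1
      let res := if 2 < st.2 && st.2 % 3 == 2 then res ++ [','] else res
      (res ++ [ch], st.2 + 1)
    else st) ([], 0)
  String.ofList ('$' :: st.1.reverse)

-- ===== PORT B =====
-- Source B's while-loop: i counts down by 3; dollars[max(i-3,0):i] is (take i).drop (i-3) in Nat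
-- arithmetic (Nat subtraction is the max with 0), and 'while i > 0' is the 0 < i guard.
def pvGroupLoop (dollars : List Char) : Nat → List Char → List Char
  | i, body =>
    if 0 < i then
      pvGroupLoop dollars (i - 3) (((dollars.take i).drop (i - 3)) ++ ',' :: body)
    else body
  termination_by i => i
  decreasing_by omega

def fix_field_str_alt (price : String) : String :=
  let digits := price.toList.filter (fun c => "0123456789".toList.contains c)
  if digits.length ≤ 2 then String.ofList ('$' :: digits)
  else
    let dollars := digits.take (digits.length - 2)
    let cents := digits.drop (digits.length - 2)
    let body := pvGroupLoop dollars (dollars.length - 3) (dollars.drop (dollars.length - 3))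
    String.ofList ('$' :: body ++ '.' :: cents)

-- ===== PRECONDITION & SPEC =====
def Spec_fix_field_str (price : String) (out : String) : Prop := out = fix_field_str_alt price
instance (price : String) (out : String) : Decidable (Spec_fix_field_str price out) := by unfold Spec_fix_field_str; infer_instance

-- ===== CLAIM (what is proved, stated in full; the proofs are below) =====
def Claim_equal_fix_field_str : Prop := ∀ (price : String), Dom_fix_field_str price → Spec_fix_field_str price (fix_field_str price)

-- ===== LEMMAS AND PROOFS =====

-- the separator A emits just before the digit written when chars_cnt = n
def sepA (n : Nat) : List Char := if n = 2 then ['.'] else if 2 < n ∧ n % 3 = 2 then [','] else []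

-- A's accumulated res for a digit list, starting from counter cnt
def tailA : Nat → List Char → List Char
  | _, [] => []
  | cnt, c :: d => sepA cnt ++ c :: tailA (cnt + 1) d

-- A's final (already re-reversed) output body, recursing on the forward digit list
def outA : List Char → List Char
  | [] => []
  | c :: r => c :: sepA r.length ++ outA r

-- comma-grouping from the right, as a forward recursion
def comf : List Char → List Char
  | [] => []
  | c :: r => c :: (if r ≠ [] ∧ r.length % 3 = 0 then [','] else []) ++ comf r

theorem stepA_res (res : List Char) (cnt : Nat) :
    (if (decide (2 < cnt) && cnt % 3 == 2) = true then
        (if (cnt == 2) = true then res ++ ['.'] else res) ++ [',']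
      else if (cnt == 2) = true then res ++ ['.'] else res)
    = res ++ sepA cnt := by
  unfold sepA
  by_cases h2 : cnt = 2
  · subst h2; simp
  · by_cases h3 : 2 < cnt ∧ cnt % 3 = 2
    · rw [if_pos (by simp [h3.1, h3.2]), if_neg (by simp [h2]), if_neg h2, if_pos h3]
    · rw [if_neg (by simpa using h3), if_neg (by simp [h2]), if_neg h2, if_neg h3]
      simp

theorem foldA (L : List Char) : ∀ (res : List Char) (cnt : Nat),
    L.foldl (fun (st : List Char × Nat) ch =>
      if "0123456789".toList.contains ch then
        let res := if st.2 == 2 then st.1 ++ ['.'] else st.1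
        let res := if 2 < st.2 && st.2 % 3 == 2 then res ++ [','] else res
        (res ++ [ch], st.2 + 1)
      else st) (res, cnt)
    = (res ++ tailA cnt (L.filter (fun c => "0123456789".toList.contains c)),
       cnt + (L.filter (fun c => "0123456789".toList.contains c)).length) := by
  induction L with
  | nil => intro res cnt; simp [tailA]
  | cons c L ih =>
    intro res cnt
    by_cases h : "0123456789".toList.contains c
    · simp only [List.foldl_cons, List.filter_cons, h, if_pos]
      rw [ih]
      simp only [Prod.mk.injEq]
      refine ⟨?_, ?_⟩
      · rw [stepA_res]
        simp [tailA]
      · simp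
        omega
    · simp only [List.foldl_cons, List.filter_cons, h]
      simp only [Bool.false_eq_true, reduceIte]
      exact ih res cnt

theorem sepA_reverse (n : Nat) : (sepA n).reverse = sepA n := by
  unfold sepA; split_ifs <;> rfl

theorem tailA_append (xs : List Char) : ∀ (cnt : Nat) (c : Char),
    tailA cnt (xs ++ [c]) = tailA cnt xs ++ sepA (cnt + xs.length) ++ [c] := by
  induction xs with
  | nil => intro cnt c; simp [tailA]
  | cons x xs ih =>
    intro cnt c
    rw [List.cons_append]
    simp only [tailA]
    rw [ih (cnt + 1) c,
      (show cnt + (x :: xs).length = cnt + 1 + xs.length by rw [List.length_cons]; omega)]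
    simp

theorem tailA_rev (D : List Char) : (tailA 0 D.reverse).reverse = outA D := by
  induction D with
  | nil => rfl
  | cons c R ih =>
    rw [List.reverse_cons, tailA_append, outA]
    simp only [List.reverse_append, List.reverse_cons, List.reverse_nil, List.nil_append,
      List.singleton_append, sepA_reverse, Nat.zero_add, List.length_reverse, ih]
    simp

theorem outA_small (D : List Char) (h : D.length ≤ 2) : outA D = D := by
  match D, h with
  | [], _ => rfl
  | [a], _ => rfl
  | [a, b], _ => rfl

theorem comf_small (xs : List Char) (h : xs.length ≤ 3) : comf xs = xs := by
  match xs, h with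
  | [], _ => rfl
  | [a], _ => rfl
  | [a, b], _ => rfl
  | [a, b, c], _ => rfl

theorem comf_append (xs ys : List Char) (hx : xs ≠ []) (hy : ys ≠ [])
    (h3 : ys.length % 3 = 0) : comf (xs ++ ys) = comf xs ++ ',' :: comf ys := by
  induction xs with
  | nil => exact absurd rfl hx
  | cons x xs ih =>
    cases xs with
    | nil =>
      simp only [List.singleton_append, comf]
      rw [if_pos ⟨hy, by simpa using h3⟩, if_neg (by simp)]
      simp
    | cons x' xs' =>
      have hlen2 : (x' :: xs' ++ ys).length = (x' :: xs').length + ys.length := by simp; omega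
      have hiff : (x' :: xs' ++ ys ≠ [] ∧ (x' :: xs' ++ ys).length % 3 = 0) ↔
          (x' :: xs' ≠ [] ∧ (x' :: xs').length % 3 = 0) := by
        rw [hlen2]
        constructor
        · rintro ⟨-, h⟩; exact ⟨by simp, by omega⟩
        · rintro ⟨-, h⟩; exact ⟨by simp, by omega⟩
      rw [List.cons_append]
      simp only [comf]
      rw [ih (by simp)]
      rw [if_congr hiff rfl rfl]
      simp [comf, List.append_assoc]

theorem outA_split (D : List Char) (h : 3 ≤ D.length) :
    outA D = comf (D.take (D.length - 2)) ++ '.' :: D.drop (D.length - 2) := by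
  induction D with
  | nil => simp at h
  | cons c R ih =>
    by_cases h2 : R.length = 2
    · obtain ⟨a, b, rfl⟩ := List.length_eq_two.mp h2
      simp [outA, sepA, comf]
    · have h3 : 3 ≤ R.length := by simp at h; omega
      have htk : (c :: R).take ((c :: R).length - 2) = c :: R.take (R.length - 2) := by
        have : (c :: R).length - 2 = (R.length - 2) + 1 := by simp; omega
        rw [this, List.take_succ_cons]
      have hdr : (c :: R).drop ((c :: R).length - 2) = R.drop (R.length - 2) := by
        have : (c :: R).length - 2 = (R.length - 2) + 1 := by simp; omega
        rw [this, List.drop_succ_cons]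
      rw [htk, hdr, outA, ih h3]
      simp only [comf]
      have hlen : (R.take (R.length - 2)).length = R.length - 2 := by
        rw [List.length_take]; omega
      have hne : R.take (R.length - 2) ≠ [] := by
        rw [← List.length_pos_iff, hlen]; omega
      by_cases hm : R.length % 3 = 2
      · rw [if_pos ⟨hne, by rw [hlen]; omega⟩]
        rw [show sepA R.length = [','] by unfold sepA; rw [if_neg (by omega), if_pos ⟨by omega, hm⟩]]
        simp
      · rw [if_neg (by rintro ⟨-, hh⟩; rw [hlen] at hh; omega)]
        rw [show sepA R.length = [] by
          unfold sepA; rw [if_neg (by omega), if_neg (by rintro ⟨-, hh⟩; exact hm hh)]]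
        simp

theorem pvGroupLoop_eq (dollars : List Char) (i : Nat) (body : List Char) :
    pvGroupLoop dollars i body =
      if 0 < i then
        pvGroupLoop dollars (i - 3) (((dollars.take i).drop (i - 3)) ++ ',' :: body)
      else body := by
  rw [pvGroupLoop]

theorem loop_inv (ds : List Char) : ∀ (i : Nat), i < ds.length → (ds.length - i) % 3 = 0 →
    pvGroupLoop ds i (comf (ds.drop i)) = comf ds := by
  intro i
  induction i using Nat.strong_induction_on with
  | _ i ih =>
    intro hlt hmod
    rcases Nat.eq_zero_or_pos i with h0 | hpos
    · subst h0; rw [pvGroupLoop_eq, if_neg (by omega)]; simp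
    · rw [pvGroupLoop_eq, if_pos hpos]
      have hseg : comf (ds.drop (i - 3)) =
          ((ds.take i).drop (i - 3)) ++ ',' :: comf (ds.drop i) := by
        have hsplit : ds.drop (i - 3) = ((ds.take i).drop (i - 3)) ++ ds.drop i := by
          conv_lhs => rw [← List.take_append_drop i ds]
          rw [List.drop_append_of_le_length (by rw [List.length_take]; omega)]
        rw [hsplit, comf_append]
        · congr 1
          exact comf_small _ (by rw [List.length_drop, List.length_take]; omega)
        · rw [← List.length_pos_iff, List.length_drop, List.length_take]; omega
        · rw [← List.length_pos_iff, List.length_drop]; omega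
        · rw [List.length_drop]; omega
      rw [← hseg]
      rcases Nat.lt_or_ge i 4 with hsm | hbig
      · have : i - 3 = 0 := by omega
        rw [this, pvGroupLoop_eq, if_neg (by omega)]
        simp
      · exact ih (i - 3) (by omega) (by omega) (by omega)

theorem alt_eq_outA (price : String) :
    fix_field_str_alt price =
      String.ofList ('$' :: outA (price.toList.filter (fun c => "0123456789".toList.contains c))) := by
  simp only [fix_field_str_alt]
  set D := price.toList.filter (fun c => "0123456789".toList.contains c) with hD
  by_cases h2 : D.length ≤ 2
  · rw [if_pos h2, outA_small D h2]
  · rw [if_neg h2]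
    have h3 : 3 ≤ D.length := by omega
    set ds := D.take (D.length - 2) with hds
    have hdslen : ds.length = D.length - 2 := by rw [hds, List.length_take]; omega
    have hbody : pvGroupLoop ds (ds.length - 3) (ds.drop (ds.length - 3)) = comf ds := by
      rcases Nat.lt_or_ge ds.length 4 with hsm | hbig
      · rw [show ds.length - 3 = 0 by omega, pvGroupLoop_eq, if_neg (by omega)]
        simp [comf_small ds (by omega)]
      · have h0 : ds.drop (ds.length - 3) = comf (ds.drop (ds.length - 3)) := by
          rw [comf_small _ (by rw [List.length_drop]; omega)]
        rw [h0]
        exact loop_inv ds (ds.length - 3) (by omega) (by omega)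
    rw [hbody, outA_split D h3, ← hds]
    simp

theorem a_eq_outA (price : String) :
    fix_field_str price =
      String.ofList ('$' :: outA (price.toList.filter (fun c => "0123456789".toList.contains c))) := by
  unfold fix_field_str
  rw [foldA]
  simp only [List.nil_append]
  rw [List.filter_reverse, tailA_rev]

-- ===== VERDICT (by name: the statement is the Claim_ definition above) =====
theorem fix_field_str_spec : Claim_equal_fix_field_str := by
  intro price _
  unfold Spec_fix_field_str
  rw [a_eq_outA, alt_eq_outA]
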